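-- pv_equiv track=rewrite | github.com/thjkral/coffee_analysis | python/dataPrep.py | comma_changer
-- ===== SOURCE A (Python) =====
-- def comma_changer(text): # When a product name contains a comma, this function changes it to a colon
--   text = list(text)
--   quote_counter = 0
--   for i,char in enumerate(text):
--     if char == '"':
--       quote_counter+=1
--     elif char == ",":
--       if quote_counter%2 == 1:
--         text[i] = ":"
--   return("".join(text))
-- ===== SOURCE B (Python) =====
-- def comma_changer(text): # When a product name contains a comma, this function changes it to a colon
--     parts = text.split('"')
--     return '"'.join(p.replace(',', ':') if i % 2 == 1 else p for i, p in enumerate(parts))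
-- ===== Notes on version B (the rewrite author's own statement) =====
-- stated objective: faster
-- what changed: Replaces the char-by-char quote-parity scan with split-on-quote, replacing commas in the odd (inside-quotes) segments, then rejoining; bulk str.split/replace/join do the work instead of a per-character Python loop.
import Mathlib
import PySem

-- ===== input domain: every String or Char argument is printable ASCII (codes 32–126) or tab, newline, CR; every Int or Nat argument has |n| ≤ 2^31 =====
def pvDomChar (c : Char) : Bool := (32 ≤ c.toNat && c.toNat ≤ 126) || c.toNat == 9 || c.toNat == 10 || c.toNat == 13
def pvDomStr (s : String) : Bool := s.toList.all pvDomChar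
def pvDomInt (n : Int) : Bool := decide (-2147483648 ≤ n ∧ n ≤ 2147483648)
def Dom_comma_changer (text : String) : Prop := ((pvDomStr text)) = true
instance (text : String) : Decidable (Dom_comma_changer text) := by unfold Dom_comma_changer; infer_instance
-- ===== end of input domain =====

-- B replaces A's char-by-char quote-parity scan with split-on-quote / replace in odd segments / rejoin (idiomatic decomposition).


-- ===== PORT A =====
-- the loop over enumerate(text) with in-place assignment, carried as structural recursion with the quote counter
def commaChangerGo (q : Int) : List Char → List Char
  | [] => []
  | c :: cs =>
    if c = '"' then c :: commaChangerGo (q + 1) cs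
    else if c = ',' then
      (if PySem.Int.mod q 2 == 1 then ':' else c) :: commaChangerGo q cs
    else c :: commaChangerGo q cs

def comma_changer (text : String) : String :=
  String.ofList (commaChangerGo 0 text.toList)

-- ===== PORT B =====
-- text.split('"'); replace ',' by ':' in segments at odd index; '"'.join (on code points; Chars.* are the exact Str semantics)
def comma_changer_alt (text : String) : String :=
  let parts := PySem.Chars.splitOn text.toList "\"".toList
  String.ofList (PySem.Chars.join "\"".toList
    ((PySem.List.enumerate parts 0).map
      (fun ip => if PySem.Int.mod ip.1 2 == 1 then PySem.Chars.replace ip.2 ",".toList ":".toList else ip.2)))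

-- ===== PRECONDITION & SPEC =====
def Spec_comma_changer (text : String) (out : String) : Prop := out = comma_changer_alt text
instance (text : String) (out : String) : Decidable (Spec_comma_changer text out) := by unfold Spec_comma_changer; infer_instance

-- ===== CLAIM (what is proved, stated in full; the proofs are below) =====
def Claim_equal_comma_changer : Prop := ∀ (text : String), Dom_comma_changer text → Spec_comma_changer text (comma_changer text)

-- ===== LEMMAS AND PROOFS =====

/-- simple split at a single separator character -/
def mySplit (q : Char) : List Char → List (List Char)
  | [] => [[]]
  | c :: t =>
    if c = q then [] :: mySplit q t
    else
      match mySplit q t with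
      | [] => [[c]]
      | p :: ps => (c :: p) :: ps

def repl (c : Char) : Char := if c = ',' then ':' else c

/-- join the segments with '"', replacing commas in every other segment, starting with flag b -/
def joinAlt (b : Bool) : List (List Char) → List Char
  | [] => []
  | p :: ps =>
    (if b then p.map repl else p) ++
      (match ps with
       | [] => []
       | _ :: _ => '"' :: joinAlt (!b) ps)

theorem mySplit_ne_nil (q : Char) (l : List Char) : mySplit q l ≠ [] := by
  cases l with
  | nil => simp [mySplit]
  | cons c t =>
    simp only [mySplit]
    split
    · simp
    · cases h : mySplit q t <;> simp

theorem splitOn_go_eq (l cur : List Char) (acc : List (List Char)) (fuel : Nat)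
    (hf : l.length ≤ fuel) :
    PySem.Chars.splitOn.go ['"'] fuel l cur acc =
      acc.reverse ++ (match mySplit '"' l with
                      | [] => []
                      | p :: ps => (cur.reverse ++ p) :: ps) := by
  induction l generalizing cur acc fuel with
  | nil =>
    cases fuel <;> simp [PySem.Chars.splitOn.go, mySplit]
  | cons c t ih =>
    cases fuel with
    | zero => simp at hf
    | succ n =>
      rw [PySem.Chars.splitOn.go]
      by_cases hc : c = '"'
      · subst hc
        have hp : List.isPrefixOf ['"'] ('"' :: t) = true := by simp [List.isPrefixOf]
        simp only [hp, if_true, List.length_singleton, List.drop_one, List.tail_cons]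
        rw [ih [] (cur.reverse :: acc) n (by simp at hf; omega)]
        simp [mySplit]
        cases h : mySplit '"' t with
        | nil => exact absurd h (mySplit_ne_nil _ _)
        | cons p ps => simp
      · have hp : List.isPrefixOf ['"'] (c :: t) = false := by simp [List.isPrefixOf]; exact fun h => hc h.symm
        simp only [hp, Bool.false_eq_true, if_false]
        rw [ih (c :: cur) acc n (by simp at hf; omega)]
        simp only [mySplit, hc, if_false]
        cases h : mySplit '"' t with
        | nil => exact absurd h (mySplit_ne_nil _ _)
        | cons p ps => simp

theorem splitOn_eq_mySplit (l : List Char) :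
    PySem.Chars.splitOn l ['"'] = mySplit '"' l := by
  rw [PySem.Chars.splitOn, splitOn_go_eq l [] [] (l.length + 1) (by omega)]
  cases h : mySplit '"' l with
  | nil => exact absurd h (mySplit_ne_nil _ _)
  | cons p ps => simp

theorem replace_go_eq (l acc : List Char) (fuel : Nat) (hf : l.length ≤ fuel) :
    PySem.Chars.replace.go [','] [':'] fuel l acc = acc.reverse ++ l.map repl := by
  induction l generalizing acc fuel with
  | nil => cases fuel <;> simp [PySem.Chars.replace.go]
  | cons c t ih =>
    cases fuel with
    | zero => simp at hf
    | succ n =>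
      rw [PySem.Chars.replace.go]
      by_cases hc : c = ','
      · subst hc
        have hp : List.isPrefixOf [','] (',' :: t) = true := by simp [List.isPrefixOf]
        simp only [hp, if_true, List.length_singleton, List.drop_one, List.tail_cons]
        rw [ih ([':'].reverse ++ acc) n (by simp at hf; omega)]
        simp [repl]
      · have hp : List.isPrefixOf [','] (c :: t) = false := by
          simp [List.isPrefixOf]; exact fun h => hc h.symm
        simp only [hp, Bool.false_eq_true, if_false]
        rw [ih (c :: acc) n (by simp at hf; omega)]
        simp [repl, hc]

theorem replace_eq_map (l : List Char) :
    PySem.Chars.replace l [','] [':'] = l.map repl := by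
  rw [PySem.Chars.replace]
  simp only [List.isEmpty_cons, Bool.false_eq_true, if_false]
  exact replace_go_eq l [] l.length le_rfl

theorem parity_flip (q : Int) :
    (PySem.Int.mod (q + 1) 2 == 1) = !(PySem.Int.mod q 2 == 1) := by
  rw [PySem.Int.mod_eq_emod_of_pos (by omega : (0:Int) < 2),
    PySem.Int.mod_eq_emod_of_pos (by omega : (0:Int) < 2)]
  rcases Int.emod_two_eq q with h | h <;>
    · have h2 : (q + 1) % 2 = (q % 2 + 1) % 2 := by omega
      simp [h2, h]

/-- the A-side loop produces the alternating join of the split -/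
theorem aGo_eq_joinAlt (l : List Char) (q : Int) :
    commaChangerGo q l = joinAlt (PySem.Int.mod q 2 == 1) (mySplit '"' l) := by
  induction l generalizing q with
  | nil => simp [commaChangerGo, mySplit, joinAlt]
  | cons c t ih =>
    by_cases hc : c = '"'
    · subst hc
      simp only [commaChangerGo, mySplit]
      rw [ih (q + 1), parity_flip]
      cases h : mySplit '"' t with
      | nil => exact absurd h (mySplit_ne_nil _ _)
      | cons p ps => simp [joinAlt]
    · rw [show mySplit '"' (c :: t) = (match mySplit '"' t with
            | [] => [[c]]
            | p :: ps => (c :: p) :: ps) by simp [mySplit, hc]]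
      cases h : mySplit '"' t with
      | nil => exact absurd h (mySplit_ne_nil _ _)
      | cons p ps =>
        by_cases hcc : c = ','
        · subst hcc
          simp only [commaChangerGo, if_neg hc, joinAlt, List.map_cons]
          rw [ih q, h]
          simp only [PySem.Int.mod_eq_emod_of_pos (by omega : (0:Int) < 2), joinAlt]
          by_cases hb : q % 2 = 1 <;> simp [hb, repl]
        · simp only [commaChangerGo, if_neg hc, if_neg hcc, joinAlt, List.map_cons]
          rw [ih q, h]
          simp only [joinAlt]
          split <;> simp [repl, hcc]

/-- the B-side enumerate/map/join produces the same alternating join -/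
theorem join_enum_eq_joinAlt (ps : List (List Char)) (i : Int) (hps : ps ≠ []) :
    PySem.Chars.join ['"']
      ((PySem.List.enumerate ps i).map
        (fun ip => if PySem.Int.mod ip.1 2 == 1 then ip.2.map repl else ip.2)) =
      joinAlt (PySem.Int.mod i 2 == 1) ps := by
  induction ps generalizing i with
  | nil => exact absurd rfl hps
  | cons p t ih =>
    cases t with
    | nil =>
      simp [PySem.List.enumerate_cons, PySem.List.enumerate_nil, PySem.Chars.join,
        List.intercalate, joinAlt]
    | cons p2 t2 =>
      have ih2 := ih (i + 1) (by simp)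
      have hj : ∀ (x y : List Char) (r : List (List Char)),
          PySem.Chars.join ['"'] (x :: y :: r) = x ++ '"' :: PySem.Chars.join ['"'] (y :: r) := by
        intro x y r
        simp [PySem.Chars.join, List.intercalate, List.intersperse]
      obtain ⟨e, es, he⟩ : ∃ e es,
          (PySem.List.enumerate (p2 :: t2) (i + 1)).map
            (fun ip => if PySem.Int.mod ip.1 2 == 1 then ip.2.map repl else ip.2) = e :: es := by
        rw [PySem.List.enumerate_cons]; exact ⟨_, _, rfl⟩
      rw [PySem.List.enumerate_cons, List.map_cons, he, hj, ← he, ih2, parity_flip]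
      simp only [joinAlt, PySem.Int.mod_eq_emod_of_pos (by omega : (0:Int) < 2)]

theorem comma_changer_spec : Claim_equal_comma_changer := by
  intro text _
  show comma_changer text = comma_changer_alt text
  unfold comma_changer comma_changer_alt
  have hsep : "\"".toList = ['"'] := rfl
  have hc : ",".toList = [','] := rfl
  have hcol : ":".toList = [':'] := rfl
  rw [hsep, hc, hcol, splitOn_eq_mySplit]
  simp only [replace_eq_map]
  rw [join_enum_eq_joinAlt _ 0 (mySplit_ne_nil _ _), aGo_eq_joinAlt]
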